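-- pv_equiv track=rewrite | github.com/TheAnsarya/ffmq-info | tools/rom-operations/rom_diff.py | find_diff_regions
-- ===== SOURCE A (Python) =====
-- from typing import List, Tuple, Dict, Optional
--
-- def find_diff_regions(diffs: List[Tuple[int, int, int]]) -> List[Tuple[int, int, int]]:
-- 	"""Group consecutive differences into regions
--
-- 	Returns list of (start_offset, end_offset, count) tuples
-- 	"""
-- 	if not diffs:
-- 		return []
--
-- 	regions = []
-- 	current_start = diffs[0][0]
-- 	current_end = diffs[0][0]
--
-- 	for offset, _, _ in diffs[1:]:
-- 		if offset == current_end + 1: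
-- 			# Consecutive difference
-- 			current_end = offset
-- 		else:
-- 			# Gap found, save current region and start new one
-- 			regions.append((current_start, current_end, current_end - current_start + 1))
-- 			current_start = offset
-- 			current_end = offset
--
-- 	# Add final region
-- 	regions.append((current_start, current_end, current_end - current_start + 1))
--
-- 	return regions
-- ===== SOURCE B (Python) =====
-- from itertools import groupby
-- from typing import List, Tuple
--
-- def find_diff_regions(diffs: List[Tuple[int, int, int]]) -> List[Tuple[int, int, int]]:
-- 	"""Group consecutive differences into regions
--
-- 	Returns list of (start_offset, end_offset, count) tuples
-- 	"""
-- 	offsets = [d[0] for d in diffs]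
-- 	regions = []
-- 	for _, grp in groupby(enumerate(offsets), key=lambda p: p[1] - p[0]):
-- 		g = [v for _, v in grp]
-- 		regions.append((g[0], g[-1], len(g)))
-- 	return regions
-- ===== Notes on version B (the rewrite author's own statement) =====
-- stated objective: idiomatic
-- what changed: Replaces the running current_start/current_end state machine with an itertools.groupby over enumerate(offsets) keyed by offset-minus-index, so each maximal +1-consecutive run becomes one group mapped to (first, last, len).
import Mathlib
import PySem

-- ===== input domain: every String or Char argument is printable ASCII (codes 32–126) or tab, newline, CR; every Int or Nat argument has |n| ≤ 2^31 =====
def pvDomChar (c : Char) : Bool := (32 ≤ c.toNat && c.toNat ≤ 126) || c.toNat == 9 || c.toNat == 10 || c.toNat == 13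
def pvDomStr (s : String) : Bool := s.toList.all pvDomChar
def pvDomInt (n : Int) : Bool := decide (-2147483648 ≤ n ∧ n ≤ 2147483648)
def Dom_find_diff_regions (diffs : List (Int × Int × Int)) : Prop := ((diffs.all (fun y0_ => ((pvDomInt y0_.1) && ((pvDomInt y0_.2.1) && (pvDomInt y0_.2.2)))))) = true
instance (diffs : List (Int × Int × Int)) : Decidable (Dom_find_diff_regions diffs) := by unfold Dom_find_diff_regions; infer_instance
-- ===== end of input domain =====

-- B replaces A's running current_start/current_end state machine by an itertools.groupby
-- over enumerate(offsets) keyed by offset-minus-index (more idiomatic; same cost).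

-- ===== PORT A =====
def find_diff_regions (diffs : List (Int × Int × Int)) : List (Int × Int × Int) :=
  match diffs with
  | [] => []
  | d0 :: rest =>
    -- state = (regions, current_start, current_end); loop over diffs[1:]
    let st := rest.foldl
      (fun (st : List (Int × Int × Int) × Int × Int) d =>
        if d.1 = st.2.2 + 1 then (st.1, st.2.1, d.1)
        else (st.1 ++ [(st.2.1, st.2.2, st.2.2 - st.2.1 + 1)], d.1, d.1))
      ([], d0.1, d0.1)
    st.1 ++ [(st.2.1, st.2.2, st.2.2 - st.2.1 + 1)]

-- ===== PORT B =====
-- hand transcription of itertools.groupby(·, key = fun p => p.2 - p.1): maximal runs of equal key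
def pvGroupRuns : List (Int × Int) → List (List (Int × Int))
  | [] => []
  | x :: xs =>
    (x :: xs.takeWhile (fun q => q.2 - q.1 == x.2 - x.1))
      :: pvGroupRuns (xs.dropWhile (fun q => q.2 - q.1 == x.2 - x.1))
termination_by l => l.length
decreasing_by
  exact Nat.lt_succ_of_le (List.length_dropWhile_le _ _)

def find_diff_regions_alt (diffs : List (Int × Int × Int)) : List (Int × Int × Int) :=
  let offsets := diffs.map (fun d => d.1)
  (pvGroupRuns (PySem.List.enumerate offsets 0)).map
    (fun g => ((g.headD (0, 0)).2, (g.getLastD (0, 0)).2, (g.length : Int)))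

-- ===== PRECONDITION & SPEC =====
def Spec_find_diff_regions (diffs : List (Int × Int × Int)) (out : List (Int × Int × Int)) : Prop := out = find_diff_regions_alt diffs
instance (diffs : List (Int × Int × Int)) (out : List (Int × Int × Int)) : Decidable (Spec_find_diff_regions diffs out) := by unfold Spec_find_diff_regions; infer_instance

-- ===== CLAIM (what is proved, stated in full; the proofs are below) =====
def Claim_equal_find_diff_regions : Prop := ∀ (diffs : List (Int × Int × Int)), Dom_find_diff_regions diffs → Spec_find_diff_regions diffs (find_diff_regions diffs)

-- ===== LEMMAS AND PROOFS =====

-- common recursive description of the grouping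
def pvGo (s e : Int) : List Int → List (Int × Int × Int)
  | [] => [(s, e, e - s + 1)]
  | y :: ys => if y = e + 1 then pvGo s y ys else (s, e, e - s + 1) :: pvGo y y ys

def pvRegions : List Int → List (Int × Int × Int)
  | [] => []
  | x :: xs => pvGo x x xs

lemma a_loop (xs : List (Int × Int × Int)) : ∀ (regs : List (Int × Int × Int)) (s e : Int),
    (let st := xs.foldl
        (fun (st : List (Int × Int × Int) × Int × Int) d =>
          if d.1 = st.2.2 + 1 then (st.1, st.2.1, d.1)
          else (st.1 ++ [(st.2.1, st.2.2, st.2.2 - st.2.1 + 1)], d.1, d.1))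
        (regs, s, e)
     st.1 ++ [(st.2.1, st.2.2, st.2.2 - st.2.1 + 1)])
    = regs ++ pvGo s e (xs.map (fun d => d.1)) := by
  induction xs with
  | nil => intro regs s e; simp [pvGo]
  | cons d ds ih =>
    intro regs s e
    simp only [List.foldl_cons, List.map_cons, pvGo]
    by_cases h : d.1 = e + 1
    · simp only [h]
      exact ih regs s (e + 1)
    · simp only [if_neg h]
      rw [ih]
      simp [List.append_assoc]

lemma b_main (xs : List Int) : ∀ (n s e i0 : Int) (gr : List (Int × Int)),
    (((i0, s) :: gr).getLastD (0, 0)).2 = e →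
    ((((i0, s) :: gr).length : Int)) = e - s + 1 →
    ((((i0, s) :: gr) ++ (PySem.List.enumerate xs n).takeWhile (fun q => q.2 - q.1 == e + 1 - n))
        :: pvGroupRuns ((PySem.List.enumerate xs n).dropWhile (fun q => q.2 - q.1 == e + 1 - n))).map
      (fun g => ((g.headD (0, 0)).2, (g.getLastD (0, 0)).2, (g.length : Int)))
    = pvGo s e xs := by
  induction xs with
  | nil =>
    intro n s e i0 gr hlast hlen
    rw [PySem.List.enumerate_nil, List.takeWhile_nil, List.dropWhile_nil, List.append_nil]
    simp only [pvGroupRuns, pvGo, List.map_cons, List.map_nil]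
    rw [hlast, hlen, List.headD_cons]
  | cons y ys ih =>
    intro n s e i0 gr hlast hlen
    rw [PySem.List.enumerate_cons]
    by_cases h : y = e + 1
    · have hkey : ((y : Int) - n == e + 1 - n) = true := by simp [h]
      have ht := List.takeWhile_cons_of_pos
        (p := fun q : Int × Int => q.2 - q.1 == e + 1 - n)
        (a := (n, y)) (l := PySem.List.enumerate ys (n + 1)) hkey
      have hd := List.dropWhile_cons_of_pos
        (p := fun q : Int × Int => q.2 - q.1 == e + 1 - n)
        (a := (n, y)) (l := PySem.List.enumerate ys (n + 1)) hkey
      rw [ht, hd, pvGo, if_pos h]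
      have hk2 : (fun q : Int × Int => q.2 - q.1 == e + 1 - n)
          = (fun q : Int × Int => q.2 - q.1 == y + 1 - (n + 1)) := by
        funext q; congr 1; omega
      rw [hk2]
      have hrec := ih (n + 1) s y i0 (gr ++ [(n, y)])
        (by
          rw [List.getLastD_eq_getLast?,
            show ((i0, s) :: (gr ++ [(n, y)])) = ((i0, s) :: gr) ++ [(n, y)] by simp,
            List.getLast?_concat]
          rfl)
        (by
          simp only [List.length_cons, List.length_append, List.length_nil] at hlen ⊢
          push_cast at hlen ⊢
          omega)
      simp only [List.cons_append, List.append_assoc, List.nil_append] at hrec ⊢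
      exact hrec
    · have hkey : ¬ ((y : Int) - n == e + 1 - n) = true := by simp; omega
      have ht := List.takeWhile_cons_of_neg
        (p := fun q : Int × Int => q.2 - q.1 == e + 1 - n)
        (a := (n, y)) (l := PySem.List.enumerate ys (n + 1)) hkey
      have hd := List.dropWhile_cons_of_neg
        (p := fun q : Int × Int => q.2 - q.1 == e + 1 - n)
        (a := (n, y)) (l := PySem.List.enumerate ys (n + 1)) hkey
      rw [ht, hd, List.append_nil, pvGo, if_neg h]
      simp only [pvGroupRuns]
      have hk2 : (fun q : Int × Int => q.2 - q.1 == ((n, y) : Int × Int).2 - ((n, y) : Int × Int).1)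
          = (fun q : Int × Int => q.2 - q.1 == y + 1 - (n + 1)) := by
        funext q; congr 1; omega
      rw [hk2]
      have hrec := ih (n + 1) y y n ([]) (by simp) (by simp)
      simp only [List.cons_append, List.nil_append] at hrec
      rw [List.map_cons, hrec, hlast, hlen, List.headD_cons]

lemma a_eq_regions (diffs : List (Int × Int × Int)) :
    find_diff_regions diffs = pvRegions (diffs.map (fun d => d.1)) := by
  match diffs with
  | [] => rfl
  | d0 :: rest =>
    simp only [find_diff_regions, List.map_cons, pvRegions]
    exact a_loop rest [] d0.1 d0.1

lemma b_eq_regions (diffs : List (Int × Int × Int)) :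
    find_diff_regions_alt diffs = pvRegions (diffs.map (fun d => d.1)) := by
  unfold find_diff_regions_alt
  cases h : diffs.map (fun d => d.1) with
  | nil => simp [pvGroupRuns, pvRegions, PySem.List.enumerate_nil]
  | cons x xs =>
    show (pvGroupRuns (PySem.List.enumerate (x :: xs) 0)).map
        (fun g => ((g.headD (0, 0)).2, (g.getLastD (0, 0)).2, (g.length : Int)))
      = pvRegions (x :: xs)
    rw [PySem.List.enumerate_cons]
    simp only [pvGroupRuns, pvRegions]
    have hk2 : (fun q : Int × Int => q.2 - q.1 == (((0 : Int), x) : Int × Int).2 - (((0 : Int), x) : Int × Int).1)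
        = (fun q : Int × Int => q.2 - q.1 == x + 1 - (0 + 1)) := by
      funext q; congr 1; omega
    rw [hk2]
    have hrec := b_main xs (0 + 1) x x 0 [] (by simp) (by simp)
    simp only [List.cons_append, List.nil_append] at hrec
    exact hrec

-- ===== VERDICT (by name: the statement is the Claim_ definition above) =====
theorem find_diff_regions_spec : Claim_equal_find_diff_regions := by
  intro diffs _
  unfold Spec_find_diff_regions
  rw [a_eq_regions, b_eq_regions]
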